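-- pv_equiv track=rewrite | github.com/ah474747/terpene-synthase-classifier | TPS_Predictor_v1_Original/focused_validation.py | clean_product_names
-- ===== SOURCE A (Python) =====
-- from typing import List, Dict, Tuple, Optional
--
-- def clean_product_names(products: List[str]) -> List[str]:
--     """
--     Clean and standardize product names.
--
--     Args:
--         products: List of product names
--
--     Returns:
--         List of cleaned product names
--     """
--     cleaned_products = []
--
--     for product in products:
--         # Convert to lowercase
--         product = product.lower().strip()
--
--         # Skip empty or very short products
--         if len(product) < 3:
--             cleaned_products.append('unknown')
--             continue
--
--         # Standardize common names
--         if 'limonene' in product or 'limone' in product: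
--             product = 'limonene'
--         elif 'pinene' in product:
--             product = 'pinene'
--         elif 'myrcene' in product:
--             product = 'myrcene'
--         elif 'linalool' in product:
--             product = 'linalool'
--         elif 'geraniol' in product:
--             product = 'geraniol'
--         elif 'caryophyllene' in product:
--             product = 'caryophyllene'
--         elif 'humulene' in product:
--             product = 'humulene'
--         elif 'farnesene' in product:
--             product = 'farnesene'
--         elif 'bisabolene' in product:
--             product = 'bisabolene'
--         elif 'squalene' in product:
--             product = 'squalene'
--         elif 'sabinene' in product:
--             product = 'sabinene'
--         elif 'terpinolene' in product:
--             product = 'terpinolene'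
--         elif 'terpineol' in product:
--             product = 'terpineol'
--         elif 'germacrene' in product:
--             product = 'germacrene'
--         elif 'thujene' in product:
--             product = 'thujene'
--         elif 'ocimene' in product:
--             product = 'ocimene'
--         elif 'cadinene' in product:
--             product = 'cadinene'
--         elif 'phellandrene' in product:
--             product = 'phellandrene'
--         elif 'copaene' in product:
--             product = 'copaene'
--         elif 'camphene' in product:
--             product = 'camphene'
--         elif 'selinene' in product:
--             product = 'selinene'
--         elif 'carvacrol' in product:
--             product = 'carvacrol'
--         elif 'thymol' in product:
--             product = 'thymol'
--         else:
--             # Keep original if no match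
--             product = product
--
--         cleaned_products.append(product)
--
--     return cleaned_products
-- ===== SOURCE B (Python) =====
-- # Different algorithm: instead of testing each keyword for membership, scan the
-- # string once and hash-look-up every candidate substring p[i:i+L] in a dict
-- # keyword -> (priority, canonical), keeping the minimum-priority hit (= A's
-- # first elif branch, since branch order equals table order).
-- _TABLE = [
--     ("limonene", "limonene"), ("limone", "limonene"),
--     ("pinene", "pinene"), ("myrcene", "myrcene"), ("linalool", "linalool"),
--     ("geraniol", "geraniol"), ("caryophyllene", "caryophyllene"),
--     ("humulene", "humulene"), ("farnesene", "farnesene"),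
--     ("bisabolene", "bisabolene"), ("squalene", "squalene"),
--     ("sabinene", "sabinene"), ("terpinolene", "terpinolene"),
--     ("terpineol", "terpineol"), ("germacrene", "germacrene"),
--     ("thujene", "thujene"), ("ocimene", "ocimene"), ("cadinene", "cadinene"),
--     ("phellandrene", "phellandrene"), ("copaene", "copaene"),
--     ("camphene", "camphene"), ("selinene", "selinene"),
--     ("carvacrol", "carvacrol"), ("thymol", "thymol"),
-- ]
-- _KEYS = {kw: (pr, canon) for pr, (kw, canon) in enumerate(_TABLE)}
-- _LENS = (6, 7, 8, 9, 10, 11, 12, 13)  # the distinct keyword lengths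
--
--
-- def _classify(p):
--     best = None
--     for i in range(len(p)):
--         for L in _LENS:
--             hit = _KEYS.get(p[i:i + L])
--             if hit is not None and (best is None or hit[0] < best[0]):
--                 best = hit
--     return p if best is None else best[1]
--
--
-- def clean_product_names(products):
--     out = []
--     for product in products:
--         p = product.lower().strip()
--         out.append('unknown' if len(p) < 3 else _classify(p))
--     return out
-- ===== Notes on version B (the rewrite author's own statement) =====
-- stated objective: alternative
-- what changed: Instead of A's 23 ordered substring-membership tests per product, B scans the cleaned string once and hash-looks-up every candidate substring p[i:i+L] (L ranging over the 8 distinct keyword lengths) in a dict keyword->(priority, canonical), keeping the minimum-priority hit, which coincides with A's first matching elif branch.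
import Mathlib
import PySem

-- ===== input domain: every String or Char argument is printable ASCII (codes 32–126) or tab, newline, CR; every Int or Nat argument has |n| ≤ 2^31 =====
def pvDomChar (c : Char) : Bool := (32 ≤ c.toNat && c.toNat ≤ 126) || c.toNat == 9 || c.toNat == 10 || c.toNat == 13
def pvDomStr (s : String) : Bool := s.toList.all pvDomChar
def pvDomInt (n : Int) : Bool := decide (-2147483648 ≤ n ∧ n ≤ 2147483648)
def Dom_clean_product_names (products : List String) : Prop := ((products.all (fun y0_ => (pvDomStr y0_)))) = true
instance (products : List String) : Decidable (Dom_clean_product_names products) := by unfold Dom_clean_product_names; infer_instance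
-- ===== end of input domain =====

-- B replaces A's 23-branch keyword-membership ladder by a single left-to-right scan of the
-- string that hash-looks-up each candidate substring in a keyword dict, keeping the
-- minimum-priority hit (alternative algorithm, same result).

-- ===== PORT A =====
-- transliteration of A's per-iteration body: lower/strip, short-circuit, then the elif chain
def pvCleanProdA (product0 : String) : String :=
  let product := PySem.Str.strip (PySem.Str.lower product0)
  if PySem.Str.len product < 3 then "unknown"
  else if PySem.Str.isIn "limonene" product || PySem.Str.isIn "limone" product then "limonene"
  else if PySem.Str.isIn "pinene" product then "pinene"
  else if PySem.Str.isIn "myrcene" product then "myrcene"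
  else if PySem.Str.isIn "linalool" product then "linalool"
  else if PySem.Str.isIn "geraniol" product then "geraniol"
  else if PySem.Str.isIn "caryophyllene" product then "caryophyllene"
  else if PySem.Str.isIn "humulene" product then "humulene"
  else if PySem.Str.isIn "farnesene" product then "farnesene"
  else if PySem.Str.isIn "bisabolene" product then "bisabolene"
  else if PySem.Str.isIn "squalene" product then "squalene"
  else if PySem.Str.isIn "sabinene" product then "sabinene"
  else if PySem.Str.isIn "terpinolene" product then "terpinolene"
  else if PySem.Str.isIn "terpineol" product then "terpineol"
  else if PySem.Str.isIn "germacrene" product then "germacrene"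
  else if PySem.Str.isIn "thujene" product then "thujene"
  else if PySem.Str.isIn "ocimene" product then "ocimene"
  else if PySem.Str.isIn "cadinene" product then "cadinene"
  else if PySem.Str.isIn "phellandrene" product then "phellandrene"
  else if PySem.Str.isIn "copaene" product then "copaene"
  else if PySem.Str.isIn "camphene" product then "camphene"
  else if PySem.Str.isIn "selinene" product then "selinene"
  else if PySem.Str.isIn "carvacrol" product then "carvacrol"
  else if PySem.Str.isIn "thymol" product then "thymol"
  else product

-- the loop: cleaned_products accumulator, appended to per iteration
def clean_product_names (products : List String) : List String :=
  products.foldl (fun cleaned product => cleaned ++ [pvCleanProdA product]) []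

-- ===== PORT B =====
-- Source B's _TABLE
def pvTableB : List (String × String) :=
  [("limonene", "limonene"), ("limone", "limonene"),
   ("pinene", "pinene"), ("myrcene", "myrcene"), ("linalool", "linalool"),
   ("geraniol", "geraniol"), ("caryophyllene", "caryophyllene"),
   ("humulene", "humulene"), ("farnesene", "farnesene"),
   ("bisabolene", "bisabolene"), ("squalene", "squalene"),
   ("sabinene", "sabinene"), ("terpinolene", "terpinolene"),
   ("terpineol", "terpineol"), ("germacrene", "germacrene"),
   ("thujene", "thujene"), ("ocimene", "ocimene"), ("cadinene", "cadinene"),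
   ("phellandrene", "phellandrene"), ("copaene", "copaene"),
   ("camphene", "camphene"), ("selinene", "selinene"),
   ("carvacrol", "carvacrol"), ("thymol", "thymol")]

-- Source B's _KEYS = {kw: (pr, canon) for pr, (kw, canon) in enumerate(_TABLE)}
def pvKeysB : PySem.Dict String (Int × String) :=
  PySem.Dict.ofList ((PySem.List.enumerate pvTableB 0).map (fun je => (je.2.1, (je.1, je.2.2))))

-- Source B's _LENS (the distinct keyword lengths)
def pvLensB : List Int := [6, 7, 8, 9, 10, 11, 12, 13]

-- the inner 'if hit is not None and (best is None or hit[0] < best[0]): best = hit'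
def pvStepB (best : Option (Int × String)) (hit : Option (Int × String)) : Option (Int × String) :=
  match hit with
  | none => best
  | some h =>
    match best with
    | none => some h
    | some b => if h.1 < b.1 then some h else best

-- Source B's _classify: scan every position, hash-look-up each candidate substring, keep min priority
def pvClassifyB (p : String) : String :=
  let best := (PySem.List.pyRange 0 (PySem.Str.len p) 1).foldl
    (fun best i => pvLensB.foldl
      (fun best L => pvStepB best (PySem.Dict.get? pvKeysB (PySem.Str.slice p (some i) (some (i + L))))) best)
    none
  match best with
  | none => p
  | some b => b.2

def clean_product_names_alt (products : List String) : List String :=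
  products.foldl (fun out product =>
    let p := PySem.Str.strip (PySem.Str.lower product)
    out ++ [if PySem.Str.len p < 3 then "unknown" else pvClassifyB p]) []

-- ===== PRECONDITION & SPEC =====
def Spec_clean_product_names (products : List String) (out : List String) : Prop := out = clean_product_names_alt products
instance (products : List String) (out : List String) : Decidable (Spec_clean_product_names products out) := by unfold Spec_clean_product_names; infer_instance

-- ===== CLAIM (what is proved, stated in full; the proofs are below) =====
def Claim_equal_clean_product_names : Prop := ∀ (products : List String), Dom_clean_product_names products → Spec_clean_product_names products (clean_product_names products)

-- ===== LEMMAS AND PROOFS =====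

-- A's elif chain as a first-match lookup over the ordered table (proof-side helper)
def pvLookup : List (String × String) → String → String
  | [], p => p
  | (kw, canon) :: rest, p => if PySem.Str.isIn kw p then canon else pvLookup rest p

-- the priority/canonical pairs of the table entries whose keyword occurs in p, in table order
def pvOccL (p : String) : List (Int × String) :=
  ((PySem.List.enumerate pvTableB 0).filter (fun je => PySem.Str.isIn je.2.1 p)).map
    (fun je => (je.1, je.2.2))

-- the flattened list of dict lookups B performs on p
def pvCands (p : String) : List (Option (Int × String)) :=
  (PySem.List.pyRange 0 (PySem.Str.len p) 1).flatMap
    (fun i => pvLensB.map (fun L => PySem.Dict.get? pvKeysB (PySem.Str.slice p (some i) (some (i + L)))))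

-- (1) A's chain = 'unknown' guard + first-match lookup over the table
theorem pvChain_eq_lookup (p : String) : pvCleanProdA p =
    (if PySem.Str.len (PySem.Str.strip (PySem.Str.lower p)) < 3 then "unknown"
     else pvLookup pvTableB (PySem.Str.strip (PySem.Str.lower p))) := by
  cases h : PySem.Str.isIn "limonene" (PySem.Str.strip (PySem.Str.lower p)) <;>
    simp only [pvCleanProdA, pvTableB, pvLookup, h, Bool.false_or, Bool.true_or,
      if_true, if_false, Bool.false_eq_true]

-- (2) first-match lookup = head of the occurring-entries list
theorem pvLookup_eq_occL (p : String) :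
    pvLookup pvTableB p = (match pvOccL p with | [] => p | h :: _ => h.2) := by
  unfold pvOccL
  generalize (0 : Int) = s
  induction pvTableB generalizing s with
  | nil => simp [pvLookup]
  | cons e rest ih =>
    obtain ⟨kw, canon⟩ := e
    rw [PySem.List.enumerate_cons]
    cases h : PySem.Chars.isIn kw.toList p.toList <;>
      simp [pvLookup, PySem.Str.isIn, h]
    simpa [PySem.Str.isIn] using ih (s + 1)

-- concrete facts about the table and the dict (decidable, 24 entries)
theorem pvKeys_get (je : Int × String × String) (h : je ∈ PySem.List.enumerate pvTableB 0) :
    PySem.Dict.get? pvKeysB je.2.1 = some (je.1, je.2.2) := by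
  revert je h; decide

theorem pvKeys_items :
    pvKeysB.items = (PySem.List.enumerate pvTableB 0).map (fun je => (je.2.1, (je.1, je.2.2))) := by
  decide

theorem pvLens_mem (je : Int × String × String) (h : je ∈ PySem.List.enumerate pvTableB 0) :
    ((je.2.1.toList.length : Int)) ∈ pvLensB := by
  revert je h; decide

theorem pvKw_ne_nil (je : Int × String × String) (h : je ∈ PySem.List.enumerate pvTableB 0) :
    je.2.1.toList ≠ [] := by
  revert je h; decide

theorem pvLens_nonneg (L : Int) (h : L ∈ pvLensB) : 0 ≤ L := by revert L h; decide

-- membership in pvOccL, unfolded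
theorem pvOccL_mem (p : String) (x : Int × String) :
    x ∈ pvOccL p ↔ ∃ je ∈ PySem.List.enumerate pvTableB 0,
      PySem.Str.isIn je.2.1 p = true ∧ x = (je.1, je.2.2) := by
  unfold pvOccL
  simp only [List.mem_map, List.mem_filter]
  constructor
  · rintro ⟨je, ⟨hm, ho⟩, rfl⟩; exact ⟨je, hm, ho, rfl⟩
  · rintro ⟨je, hm, ho, rfl⟩; exact ⟨je, ⟨hm, ho⟩, rfl⟩

-- pvOccL is strictly increasing in priorities
theorem pvOccL_pairwise (p : String) : (pvOccL p).Pairwise (fun a b => a.1 < b.1) := by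
  unfold pvOccL
  rw [List.pairwise_map]
  exact (PySem.List.pairwise_lt_enumerate pvTableB 0).sublist List.filter_sublist

-- ===== the candidate list: soundness and completeness =====

-- every hit B finds corresponds to a table entry whose keyword occurs in p
theorem pvCands_sound (p : String) (h : Int × String) (hm : some h ∈ pvCands p) :
    h ∈ pvOccL p := by
  unfold pvCands at hm
  rw [List.mem_flatMap] at hm
  obtain ⟨i, hi, hmap⟩ := hm
  rw [List.mem_map] at hmap
  obtain ⟨L, hL, hget⟩ := hmap
  have hij : (p.toList.length : Int) = PySem.Str.len p := by
    simp [PySem.Str.len_eq]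
  have hi' : 0 ≤ i ∧ i < PySem.Str.len p := PySem.List.mem_pyRange_one.mp hi
  have hL0 : 0 ≤ L := pvLens_nonneg L hL
  -- the found key is the slice, a member of the dict's items, i.e. some table entry's keyword
  have hmemitems := PySem.Dict.mem_items_of_get?_eq_some _ hget
  rw [pvKeys_items, List.mem_map] at hmemitems
  obtain ⟨je, hje, hpair⟩ := hmemitems
  have hkey : PySem.Str.slice p (some i) (some (i + L)) = je.2.1 := congrArg Prod.fst hpair.symm
  have hval : h = (je.1, je.2.2) := congrArg Prod.snd hpair.symm
  -- the keyword is an infix of p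
  have hocc : PySem.Str.isIn je.2.1 p = true := by
    rw [PySem.Str.isIn_iff_infix, ← hkey, PySem.Str.toList_slice,
      PySem.Chars.slice_eq_listSlice, PySem.List.slice_toNat _ hi'.1 (by omega)]
    exact (List.take_prefix _ _).isInfix.trans (List.drop_suffix _ _).isInfix
  exact (pvOccL_mem p h).mpr ⟨je, hje, hocc, hval⟩

-- every occurring table entry is hit by B at the position where its keyword occurs
theorem pvCands_complete (p : String) (je : Int × String × String)
    (hje : je ∈ PySem.List.enumerate pvTableB 0) (hocc : PySem.Str.isIn je.2.1 p = true) :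
    some (je.1, je.2.2) ∈ pvCands p := by
  rw [PySem.Str.isIn_iff_infix] at hocc
  obtain ⟨l₁, l₂, hsplit⟩ := hocc
  have hkw := pvKw_ne_nil je hje
  have hlen : l₁.length < p.toList.length := by
    rw [← hsplit]
    have : 0 < je.2.1.toList.length := List.length_pos_iff.mpr hkw
    simp only [List.length_append]
    omega
  unfold pvCands
  rw [List.mem_flatMap]
  refine ⟨(l₁.length : Int), ?_, ?_⟩
  · rw [PySem.List.mem_pyRange_one]
    constructor
    · exact Int.natCast_nonneg _
    · rw [show PySem.Str.len p = (p.toList.length : Int) from by simp [PySem.Str.len_eq]]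
      exact_mod_cast hlen
  · rw [List.mem_map]
    refine ⟨(je.2.1.toList.length : Int), pvLens_mem je hje, ?_⟩
    have hslice : PySem.Str.slice p (some (l₁.length : Int))
        (some ((l₁.length : Int) + (je.2.1.toList.length : Int))) = je.2.1 := by
      apply String.toList_inj.mp
      rw [PySem.Str.toList_slice, PySem.Chars.slice_eq_listSlice,
        PySem.List.slice_toNat _ (Int.natCast_nonneg _) (by positivity)]
      have h1 : ((l₁.length : Int) + (je.2.1.toList.length : Int)).toNat - (l₁.length : Int).toNat
          = je.2.1.toList.length := by omega
      rw [h1, Int.toNat_natCast, ← hsplit, List.append_assoc, List.drop_left' rfl,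
        List.take_left' rfl]
    rw [hslice, pvKeys_get je hje]

-- ===== the min-priority fold =====

theorem pvStep_some (a : Int × String) (o : Option (Int × String)) :
    ∃ b, pvStepB (some a) o = some b ∧ b.1 ≤ a.1 := by
  cases o with
  | none => exact ⟨a, rfl, le_refl _⟩
  | some h =>
    by_cases hlt : h.1 < a.1
    · exact ⟨h, by simp [pvStepB, hlt], le_of_lt hlt⟩
    · exact ⟨a, by simp [pvStepB, hlt], le_refl _⟩

theorem pvFold_acc_some (os : List (Option (Int × String))) (a : Int × String) :
    ∃ b, os.foldl pvStepB (some a) = some b ∧ b.1 ≤ a.1 := by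
  induction os generalizing a with
  | nil => exact ⟨a, rfl, le_refl _⟩
  | cons o os ih =>
    obtain ⟨m, hm, hma⟩ := pvStep_some a o
    obtain ⟨b, hb, hbm⟩ := ih m
    exact ⟨b, by rw [List.foldl_cons, hm, hb], le_trans hbm hma⟩

theorem pvFold_none_iff (os : List (Option (Int × String))) :
    os.foldl pvStepB none = none ↔ ∀ h, some h ∉ os := by
  induction os with
  | nil => simp
  | cons o os ih =>
    cases o with
    | none => simp [pvStepB, ih]
    | some h =>
      simp only [List.foldl_cons]
      have hstep : pvStepB none (some h) = some h := rfl
      rw [hstep]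
      obtain ⟨b, hb, _⟩ := pvFold_acc_some os h
      constructor
      · intro hc; rw [hb] at hc; cases hc
      · intro hall; exact absurd List.mem_cons_self (hall h)

theorem pvFold_mem (os : List (Option (Int × String))) (acc : Option (Int × String))
    (b : Int × String) (hr : os.foldl pvStepB acc = some b) :
    acc = some b ∨ some b ∈ os := by
  induction os generalizing acc with
  | nil => exact Or.inl hr
  | cons o os ih =>
    rw [List.foldl_cons] at hr
    rcases ih _ hr with hacc | hmem
    · cases o with
      | none => exact Or.inl hacc
      | some h =>
        cases acc with
        | none =>
          have hsb : some h = some b := hacc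
          exact Or.inr (List.mem_cons.mpr (Or.inl hsb.symm))
        | some a =>
          by_cases hlt : h.1 < a.1
          · have hsb : some h = some b := by simpa [pvStepB, hlt] using hacc
            exact Or.inr (List.mem_cons.mpr (Or.inl hsb.symm))
          · have hsb : some a = some b := by simpa [pvStepB, hlt] using hacc
            exact Or.inl hsb
    · exact Or.inr (List.mem_cons_of_mem _ hmem)

theorem pvFold_min (os : List (Option (Int × String))) (acc : Option (Int × String))
    (b : Int × String) (hr : os.foldl pvStepB acc = some b) :
    ∀ h, some h ∈ os → b.1 ≤ h.1 := by
  induction os generalizing acc with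
  | nil => intro h hm; cases hm
  | cons o os ih =>
    intro h hm
    rw [List.foldl_cons] at hr
    rcases List.mem_cons.mp hm with rfl | hmem
    · -- h is the first element: pvStepB acc (some h) has priority ≤ h.1, and the fold only decreases it
      have hstep : ∃ m, pvStepB acc (some h) = some m ∧ m.1 ≤ h.1 := by
        cases acc with
        | none => exact ⟨h, rfl, le_refl _⟩
        | some a =>
          by_cases hlt : h.1 < a.1
          · exact ⟨h, by simp [pvStepB, hlt], le_refl _⟩
          · exact ⟨a, by simp [pvStepB, hlt], by omega⟩
      obtain ⟨m, hm', hmh⟩ := hstep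
      rw [hm'] at hr
      obtain ⟨b', hb', hbm⟩ := pvFold_acc_some os m
      rw [hb'] at hr
      cases hr
      omega
    · exact ih _ hr h hmem

-- ===== per-element equivalence =====

theorem pvClassify_eq_lookup (p : String) : pvClassifyB p = pvLookup pvTableB p := by
  rw [pvLookup_eq_occL]
  unfold pvClassifyB
  -- flatten the nested foldl into a fold over pvCands p
  have hflat : ∀ (outer : List Int) (acc : Option (Int × String)),
      outer.foldl (fun best i => pvLensB.foldl
        (fun best L => pvStepB best (PySem.Dict.get? pvKeysB (PySem.Str.slice p (some i) (some (i + L))))) best) acc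
      = (outer.flatMap (fun i => pvLensB.map
          (fun L => PySem.Dict.get? pvKeysB (PySem.Str.slice p (some i) (some (i + L)))))).foldl pvStepB acc := by
    intro outer
    induction outer with
    | nil => intro acc; rfl
    | cons i rest ih =>
      intro acc
      rw [List.foldl_cons, List.flatMap_cons, List.foldl_append, ih, List.foldl_map]
  rw [hflat]
  show (match (pvCands p).foldl pvStepB none with | none => p | some b => b.2) = _
  rcases hO : pvOccL p with _ | ⟨h, t⟩
  · -- no keyword occurs: every candidate is none, the fold stays none
    have hnone : (pvCands p).foldl pvStepB none = none := by
      rw [pvFold_none_iff]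
      intro x hx
      have := pvCands_sound p x hx
      rw [hO] at this
      cases this
    rw [hnone]
  · -- h is the first occurring entry; the fold returns exactly h
    have hh : h ∈ pvOccL p := by rw [hO]; exact List.mem_cons_self
    obtain ⟨je, hje, hocc, hval⟩ := (pvOccL_mem p h).mp hh
    have hcand : some h ∈ pvCands p := hval ▸ pvCands_complete p je hje hocc
    rcases hfold : (pvCands p).foldl pvStepB none with _ | b
    · exact absurd hfold (by rw [pvFold_none_iff]; intro hall; exact hall h hcand)
    · -- b is a candidate, so it is in pvOccL; minimality forces b = h
      have hbmem : b ∈ pvOccL p := by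
        rcases pvFold_mem _ _ _ hfold with hacc | hmem
        · cases hacc
        · exact pvCands_sound p b hmem
      have hble : b.1 ≤ h.1 := pvFold_min _ _ _ hfold h hcand
      have hpw := pvOccL_pairwise p
      rw [hO, List.pairwise_cons] at hpw
      have hbh : b = h := by
        rw [hO, List.mem_cons] at hbmem
        rcases hbmem with rfl | hbt
        · rfl
        · exact absurd (hpw.1 b hbt) (by omega)
      rw [hbh]

theorem pvCleanA_eq_B (p : String) : pvCleanProdA p =
    (if PySem.Str.len (PySem.Str.strip (PySem.Str.lower p)) < 3 then "unknown"
     else pvClassifyB (PySem.Str.strip (PySem.Str.lower p))) := by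
  rw [pvChain_eq_lookup, pvClassify_eq_lookup]

-- ===== VERDICT (by name: the statement is the Claim_ definition above) =====
theorem clean_product_names_spec : Claim_equal_clean_product_names := by
  intro products _
  show clean_product_names products = clean_product_names_alt products
  unfold clean_product_names clean_product_names_alt
  rw [PySem.List.foldl_append_singleton_eq_map]
  rw [show (fun (out : List String) (product : String) =>
        let p := PySem.Str.strip (PySem.Str.lower product)
        out ++ [if PySem.Str.len p < 3 then "unknown" else pvClassifyB p])
      = (fun out product => out ++ [(fun product =>
        let p := PySem.Str.strip (PySem.Str.lower product)
        if PySem.Str.len p < 3 then "unknown" else pvClassifyB p) product]) from rfl]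
  rw [PySem.List.foldl_append_singleton_eq_map]
  simp only [List.nil_append]
  exact List.map_congr_left (fun p _ => pvCleanA_eq_B p)
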